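-- pv_equiv track=rewrite | github.com/adio3/exercises | Week_05/Day_3/exercises.py | is_caught
-- ===== SOURCE A (Python) =====
-- def is_caught(catch):
--     cat = False
--     dist = 0
--     for p in catch:
--         if p == 'C':
--             cat = True
--         if cat == True and p == '.':
--             dist += 1
--         if p == 'm':
--             if dist < 3:
--                 return True
--             else:
--                 return False
-- ===== SOURCE B (Python) =====
-- def is_caught(catch):
--     if 'm' not in catch:
--         return None
--     pre = catch[:catch.index('m')]
--     if 'C' in pre:
--         dist = pre[pre.index('C'):].count('.')
--     else:
--         dist = 0
--     return dist < 3
-- ===== Notes on version B (the rewrite author's own statement) =====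
-- stated objective: simpler
-- what changed: Replaces the stateful flag-and-counter loop with locate-then-count: find the first 'm', take the prefix, and count '.' from the first 'C' in that prefix.
import Mathlib
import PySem

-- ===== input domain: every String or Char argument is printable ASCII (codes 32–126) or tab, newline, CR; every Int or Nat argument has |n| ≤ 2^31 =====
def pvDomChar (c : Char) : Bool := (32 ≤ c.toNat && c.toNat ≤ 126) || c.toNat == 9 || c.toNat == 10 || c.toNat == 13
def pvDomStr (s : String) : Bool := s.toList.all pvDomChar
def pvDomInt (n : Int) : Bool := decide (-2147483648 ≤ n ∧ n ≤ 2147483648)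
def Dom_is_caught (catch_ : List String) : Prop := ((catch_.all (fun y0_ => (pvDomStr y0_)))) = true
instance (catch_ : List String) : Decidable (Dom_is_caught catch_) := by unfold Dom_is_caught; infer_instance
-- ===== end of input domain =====

-- B replaces A's single stateful flag-and-counter loop with locate-then-count scans (simpler decomposition).

-- ===== PORT A =====
-- the for-loop of A, carrying the cat flag and the dist counter
def isCaughtLoop (l : List String) (cat : Bool) (dist : Int) : Option Bool :=
  match l with
  | [] => none
  | p :: rest =>
    let cat' := if p == "C" then true else cat
    let dist' := if cat' && p == "." then dist + 1 else dist
    if p == "m" then some (decide (dist' < 3)) else isCaughtLoop rest cat' dist'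

def is_caught (catch_ : List String) : Option Bool := isCaughtLoop catch_ false 0

-- ===== PORT B =====
def is_caught_alt (catch_ : List String) : Option Bool :=
  match PySem.List.index? catch_ "m" with
  | none => none
  | some m =>
    let pre := catch_.take m
    let dist : Int :=
      match PySem.List.index? pre "C" with
      | none => 0
      | some c => PySem.List.count (pre.drop c) "."
    some (decide (dist < 3))

-- ===== PRECONDITION & SPEC =====
def Spec_is_caught (catch_ : List String) (out : Option Bool) : Prop := out = is_caught_alt catch_
instance (catch_ : List String) (out : Option Bool) : Decidable (Spec_is_caught catch_ out) := by unfold Spec_is_caught; infer_instance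

-- ===== CLAIM (what is proved, stated in full; the proofs are below) =====
def Claim_equal_is_caught : Prop := ∀ (catch_ : List String), Dom_is_caught catch_ → Spec_is_caught catch_ (is_caught catch_)

-- ===== LEMMAS AND PROOFS =====

-- Once the cat flag is set, the loop counts every '.' up to the first 'm'.
theorem isCaughtLoop_true (l : List String) (dist : Int) :
    isCaughtLoop l true dist =
      match PySem.List.index? l "m" with
      | none => none
      | some m => some (decide (dist + (PySem.List.count (l.take m) "." : Int) < 3)) := by
  induction l generalizing dist with
  | nil => simp [isCaughtLoop, PySem.List.index?]
  | cons p rest ih =>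
    by_cases hm : p = "m"
    · subst hm
      simp [isCaughtLoop, PySem.List.count, List.idxOf?_cons]
    · rw [PySem.List.index?_eq_idxOf?] at *
      simp only [isCaughtLoop]
      have hne : (p == "m") = false := by simp [hm]
      have hid : List.idxOf? "m" (p :: rest) = (List.idxOf? "m" rest).map (· + 1) := by
        simp [List.idxOf?_cons, hne]
      rw [hid, hne]
      simp only [Bool.false_eq_true, if_false]
      by_cases hd : p = "."
      · subst hd
        have e1 : (("." : String) == "C") = false := by decide
        have e2 : (("." : String) == ".") = true := by decide
        simp only [e1, e2, Bool.false_eq_true, if_false, Bool.and_true, if_true]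
        rw [ih]
        cases h : List.idxOf? "m" rest with
        | none => simp
        | some m =>
          simp [PySem.List.count]
          constructor <;> intro <;> omega
      · have hne2 : (p == ".") = false := by simp [hd]
        simp only [hne2, Bool.and_false, Bool.false_eq_true, if_false]
        have : (if (p == "C") = true then true else true) = true := by
          split <;> rfl
        rw [this, ih]
        cases h : List.idxOf? "m" rest with
        | none => simp
        | some m => simp [PySem.List.count, List.count_cons, hne2]

-- Before the cat flag is set, dist stays 0; the loop equals B's computation.
theorem isCaughtLoop_false (l : List String) :
    isCaughtLoop l false 0 = is_caught_alt l := by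
  induction l with
  | nil => simp [isCaughtLoop, is_caught_alt, PySem.List.index?]
  | cons p rest ih =>
    by_cases hm : p = "m"
    · subst hm
      simp [isCaughtLoop, is_caught_alt, List.idxOf?_cons]
    · by_cases hc : p = "C"
      · subst hc
        simp only [isCaughtLoop, is_caught_alt]
        have eCm : (("C" : String) == "m") = false := by decide
        have eCC : (("C" : String) == "C") = true := by decide
        have eCd : (("C" : String) == ".") = false := by decide
        simp only [eCm, eCC, eCd, if_true, Bool.true_and, Bool.false_eq_true, if_false]
        rw [isCaughtLoop_true]
        rw [PySem.List.index?_eq_idxOf?, PySem.List.index?_eq_idxOf?]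
        have hid : List.idxOf? "m" ("C" :: rest) = (List.idxOf? "m" rest).map (· + 1) := by
          simp [List.idxOf?_cons]
        rw [hid]
        cases h : List.idxOf? "m" rest with
        | none => simp
        | some m =>
          simp only [Option.map_some]
          have htake : ("C" :: rest).take (m + 1) = "C" :: rest.take m := by simp
          rw [htake]
          have hidc : List.idxOf? "C" ("C" :: rest.take m) = some 0 := by
            simp [List.idxOf?_cons]
          rw [PySem.List.index?_eq_idxOf?, hidc]
          simp [PySem.List.count]
      · simp only [isCaughtLoop, is_caught_alt]
        have h1 : (p == "C") = false := by simp [hc]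
        have h2 : (p == "m") = false := by simp [hm]
        rw [h1, h2]
        simp only [Bool.false_eq_true, if_false, Bool.false_and]
        rw [ih]
        simp only [is_caught_alt]
        rw [PySem.List.index?_eq_idxOf?, PySem.List.index?_eq_idxOf?]
        have hid : List.idxOf? "m" (p :: rest) = (List.idxOf? "m" rest).map (· + 1) := by
          simp [List.idxOf?_cons, h2]
        rw [hid]
        cases h : List.idxOf? "m" rest with
        | none => simp
        | some m =>
          simp only [Option.map_some]
          have htake : (p :: rest).take (m + 1) = p :: rest.take m := by simp
          rw [htake]
          rw [PySem.List.index?_eq_idxOf?, PySem.List.index?_eq_idxOf?]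
          have hidc : List.idxOf? "C" (p :: rest.take m) = (List.idxOf? "C" (rest.take m)).map (· + 1) := by
            simp [List.idxOf?_cons, h1]
          rw [hidc]
          cases hC : List.idxOf? "C" (rest.take m) with
          | none => simp
          | some c => simp

-- ===== VERDICT (by name: the statement is the Claim_ definition above) =====
theorem is_caught_spec : Claim_equal_is_caught := by
  intro catch_ _
  unfold Spec_is_caught is_caught
  exact isCaughtLoop_false catch_
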